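-- pv_equiv track=rewrite | github.com/ShuhaoZQGG/linkitin | linkitin/feed.py | _extract_inner_urn
-- ===== SOURCE A (Python) =====
-- def _extract_inner_urn(update_urn: str) -> str:
--     """Extract the inner activity/ugcPost URN from a feed Update URN.
--
--     Examples:
--         "urn:li:fsd_update:(urn:li:activity:123,VERB,...)" -> "urn:li:activity:123"
--         "urn:li:fsd_update:(urn:li:ugcPost:456,VERB,...)"  -> "urn:li:ugcPost:456"
--     """
--     for prefix in ("urn:li:activity:", "urn:li:ugcPost:"):
--         idx = update_urn.find(prefix)
--         if idx >= 0:
--             # Find the end of the URN (comma or closing paren).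
--             rest = update_urn[idx:]
--             end = len(rest)
--             for sep in (",", ")"):
--                 pos = rest.find(sep)
--                 if pos >= 0 and pos < end:
--                     end = pos
--             return rest[:end]
--     return ""
-- ===== SOURCE B (Python) =====
-- def _take_until_sep(s: str) -> str:
--     out = []
--     for ch in s:
--         if ch in ",)":
--             return "".join(out)
--         out.append(ch)
--     return "".join(out)
--
--
-- def _extract_inner_urn(update_urn: str) -> str:
--     for prefix in ("urn:li:activity:", "urn:li:ugcPost:"):
--         _before, found, after = update_urn.partition(prefix)
--         if found:
--             return found + _take_until_sep(after)
--     return ""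
-- ===== Notes on version B (the rewrite author's own statement) =====
-- stated objective: idiomatic
-- what changed: Replaces A's manual find-index arithmetic, explicit slicing and the inner min-of-two-finds separator loop by str.partition plus a single character scan that collects characters up to the first separator (comma or closing parenthesis).
import Mathlib
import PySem

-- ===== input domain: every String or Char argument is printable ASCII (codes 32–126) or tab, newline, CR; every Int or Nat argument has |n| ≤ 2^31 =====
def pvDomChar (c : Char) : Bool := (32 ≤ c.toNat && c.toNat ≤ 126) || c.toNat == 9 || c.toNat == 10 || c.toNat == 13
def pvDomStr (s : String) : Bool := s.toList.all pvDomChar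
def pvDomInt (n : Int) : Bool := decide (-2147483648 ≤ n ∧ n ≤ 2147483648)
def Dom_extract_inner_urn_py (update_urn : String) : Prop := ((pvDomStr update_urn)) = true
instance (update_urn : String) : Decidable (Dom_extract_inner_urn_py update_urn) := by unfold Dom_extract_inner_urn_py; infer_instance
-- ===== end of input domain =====

-- B replaces A's manual index arithmetic and the min-of-two-finds separator loop by str.partition
-- plus a single character scan that stops at the first separator — comma or closing parenthesis (objective: idiomatic; no speed claim).

-- ===== PORT A =====
-- outer 'for prefix in (…): … return …' loop, early return = recursion on the remaining prefixes
def goA (cs : List Char) : List (List Char) → List Char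
  | [] => []
  | p :: ps =>
    let idx := PySem.Chars.find cs p
    if 0 ≤ idx then
      -- rest = update_urn[idx:]
      let rest := PySem.Chars.slice cs (some idx) none
      -- for sep in (",", ")"): pos = rest.find(sep); if pos >= 0 and pos < end: end = pos
      let e := [([','] : List Char), [')']].foldl
        (fun e sep =>
          let pos := PySem.Chars.find rest sep
          if 0 ≤ pos ∧ pos < e then pos else e)
        (PySem.Chars.len rest)
      -- return rest[:end]
      PySem.Chars.slice rest none (some e)
    else goA cs ps

def extract_inner_urn_py (update_urn : String) : String :=
  String.ofList (goA update_urn.toList ["urn:li:activity:".toList, "urn:li:ugcPost:".toList])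

-- ===== PORT B =====
-- port of _take_until_sep: for ch in s: if ch in ",)": return joined; append
def takeUntilSepC : List Char → List Char
  | [] => []
  | ch :: t => if ch = ',' ∨ ch = ')' then [] else ch :: takeUntilSepC t

-- hand port of str.partition (not in PySem); exact: CPython returns
-- (s[:i], sep, s[i+len(sep):]) when sep is found at i = s.find(sep), else (s, '', '')
def partition3 (cs p : List Char) : List Char × List Char × List Char :=
  let i := PySem.Chars.find cs p
  if 0 ≤ i then (cs.take i.toNat, p, cs.drop (i.toNat + p.length)) else (cs, [], [])

def goB (cs : List Char) : List (List Char) → List Char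
  | [] => []
  | p :: ps =>
    let r := partition3 cs p
    if r.2.1 ≠ [] then r.2.1 ++ takeUntilSepC r.2.2 else goB cs ps

def extract_inner_urn_py_alt (update_urn : String) : String :=
  String.ofList (goB update_urn.toList ["urn:li:activity:".toList, "urn:li:ugcPost:".toList])

-- ===== PRECONDITION & SPEC =====
def Spec_extract_inner_urn_py (update_urn : String) (out : String) : Prop := out = extract_inner_urn_py_alt update_urn
instance (update_urn : String) (out : String) : Decidable (Spec_extract_inner_urn_py update_urn out) := by unfold Spec_extract_inner_urn_py; infer_instance

-- ===== CLAIM (what is proved, stated in full; the proofs are below) =====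
def Claim_equal_extract_inner_urn_py : Prop := ∀ (update_urn : String), Dom_extract_inner_urn_py update_urn → Spec_extract_inner_urn_py update_urn (extract_inner_urn_py update_urn)

-- ===== LEMMAS AND PROOFS =====

-- the separator predicate both programs stop at
def sepChar (c : Char) : Bool := c == ',' || c == ')'

lemma takeUntilSepC_eq_takeWhile (t : List Char) :
    takeUntilSepC t = t.takeWhile (fun c => !sepChar c) := by
  induction t with
  | nil => rfl
  | cons ch t ih =>
    by_cases h : ch = ',' ∨ ch = ')' <;>
      simp [takeUntilSepC, List.takeWhile_cons, sepChar, h, ih] <;> tauto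

-- [c] is a prefix exactly when the head is c
lemma singleton_prefix_iff (c : Char) (u : List Char) : [c] <+: u ↔ u.head? = some c := by
  cases u with
  | nil => simp
  | cons a t =>
    constructor
    · rintro ⟨t', ht'⟩; simp at ht'; simp [ht'.1]
    · intro h; simp at h; exact ⟨t, by simp [h]⟩

-- Chars.find for a single character: -1 and absent, or the first index holding c
lemma findChar_spec (t : List Char) (c : Char) :
    (PySem.Chars.find t [c] = -1 ∧ ∀ j : Nat, t[j]? ≠ some c) ∨
    (∃ k : Nat, PySem.Chars.find t [c] = (k : Int) ∧ k < t.length ∧ t[k]? = some c ∧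
      ∀ j : Nat, j < k → t[j]? ≠ some c) := by
  by_cases h : PySem.Chars.find t [c] = -1
  · left
    refine ⟨h, fun j hj => ?_⟩
    have := (PySem.Chars.find_eq_neg_one_iff (s := t) (sub := [c])).mp h
    exact this ((List.singleton_infix_iff c t).mpr (List.mem_of_getElem? hj))
  · right
    have h0 : 0 ≤ PySem.Chars.find t [c] := by
      rcases (PySem.Chars.find_nonneg_iff (s := t) (sub := [c])) with ⟨h1, h2⟩
      exact h2 ((PySem.Chars.find_ne_neg_one_iff (s := t) (sub := [c])).mp h)
    obtain ⟨hpre, hmin⟩ := PySem.Chars.find_spec h0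
    refine ⟨(PySem.Chars.find t [c]).toNat, (Int.toNat_of_nonneg h0).symm, ?_, ?_, ?_⟩
    · have := (singleton_prefix_iff c _).mp hpre
      rw [List.head?_drop] at this
      obtain ⟨hlt, -⟩ := List.getElem?_eq_some_iff.mp this
      exact hlt
    · have := (singleton_prefix_iff c _).mp hpre
      rwa [List.head?_drop] at this
    · intro j hj hget
      exact hmin j hj ((singleton_prefix_iff c _).mpr (by rwa [List.head?_drop]))

-- every position inside the takeWhile part is a non-separator
lemma takeWhile_pos_not_sep (l : List Char) (j : Nat)
    (hj : j < (l.takeWhile (fun c => !sepChar c)).length) :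
    ∃ c, l[j]? = some c ∧ sepChar c = false := by
  induction l generalizing j with
  | nil => simp at hj
  | cons a t ih =>
    rw [List.takeWhile_cons] at hj
    by_cases ha : sepChar a
    · simp [ha] at hj
    · simp only [Bool.not_eq_eq_eq_not, Bool.not_true, ha, if_pos, List.length_cons] at hj
      cases j with
      | zero => exact ⟨a, by simp, by simpa using ha⟩
      | succ j =>
        obtain ⟨c, hc1, hc2⟩ := ih j (by simpa using hj)
        exact ⟨c, by simpa using hc1, hc2⟩

-- the first position after the takeWhile part is a separator
lemma takeWhile_end_sep (l : List Char)
    (h : (l.takeWhile (fun c => !sepChar c)).length < l.length) :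
    ∃ c, l[(l.takeWhile (fun c => !sepChar c)).length]? = some c ∧ sepChar c = true := by
  induction l with
  | nil => simp at h
  | cons a t ih =>
    rw [List.takeWhile_cons]
    by_cases ha : sepChar a
    · exact ⟨a, by simp [ha], ha⟩
    · simp only [Bool.not_eq_eq_eq_not, Bool.not_true, ha, List.takeWhile_cons] at h ⊢
      obtain ⟨c, hc1, hc2⟩ := ih (by simpa using h)
      exact ⟨c, by simpa using hc1, hc2⟩

-- cross-separator characterisation: the first c-position is at or after the non-separator run
lemma findChar_key (rest : List Char) (c : Char) (hc : sepChar c = true) :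
    (PySem.Chars.find rest [c] = -1 ∧ ∀ j : Nat, rest[j]? ≠ some c) ∨
    (∃ k : Nat, PySem.Chars.find rest [c] = (k : Int) ∧ k < rest.length ∧
      (rest.takeWhile (fun c => !sepChar c)).length ≤ k ∧ rest[k]? = some c ∧
      ∀ j : Nat, j < k → rest[j]? ≠ some c) := by
  rcases findChar_spec rest c with h | ⟨k, h1, h2, h3, h4⟩
  · exact Or.inl h
  · refine Or.inr ⟨k, h1, h2, ?_, h3, h4⟩
    by_contra hlt
    obtain ⟨c', hc1, hc2⟩ := takeWhile_pos_not_sep rest k (by omega)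
    rw [h3] at hc1
    obtain rfl : c = c' := by injection hc1
    rw [hc2] at hc
    exact Bool.false_ne_true hc

-- A's end-of-URN computation finds exactly the length of the non-separator prefix
lemma end_eq_takeWhile (rest : List Char) :
    (let e := [([','] : List Char), [')']].foldl
        (fun e sep =>
          let pos := PySem.Chars.find rest sep
          if 0 ≤ pos ∧ pos < e then pos else e)
        (PySem.Chars.len rest);
      0 ≤ e ∧ e.toNat = (rest.takeWhile (fun c => !sepChar c)).length) := by
  have hL : PySem.Chars.len rest = (rest.length : Int) := PySem.Chars.len_eq rest
  have hmle : (rest.takeWhile (fun c => !sepChar c)).length ≤ rest.length :=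
    (List.takeWhile_prefix _).length_le
  simp only [List.foldl, hL]
  set m := (rest.takeWhile (fun c => !sepChar c)).length with hm
  have hf := findChar_key rest ',' (by decide)
  have hg := findChar_key rest ')' (by decide)
  rcases Nat.lt_or_ge m rest.length with hmlt | hmge
  · -- a separator sits right after the run, at index m
    obtain ⟨c0, hc0, hsep0⟩ := takeWhile_end_sep rest hmlt
    rw [← hm] at hc0
    have hc0' : c0 = ',' ∨ c0 = ')' := by simpa [sepChar] using hsep0
    rcases hc0' with rfl | rfl
    · -- rest[m] = ','  : find ',' = m, find ')' is -1 or ≥ m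
      rcases hf with ⟨_, habs⟩ | ⟨kf, e1, _, e3, e4, e5⟩
      · exact absurd hc0 (habs m)
      have hkfm : kf = m := by
        by_contra hne
        rcases Nat.lt_or_ge m kf with hlt | hge
        · exact e5 m hlt hc0
        · omega
      subst hkfm
      rcases hg with ⟨g1, _⟩ | ⟨kg, g1, g2, g3, g4, g5⟩ <;>
        · rw [e1, g1]; split_ifs <;> constructor <;> omega
    · -- rest[m] = ')'  : find ')' = m, find ',' is -1 or > m
      rcases hg with ⟨_, habs⟩ | ⟨kg, g1, _, g3, g4, g5⟩
      · exact absurd hc0 (habs m)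
      have hkgm : kg = m := by
        by_contra hne
        rcases Nat.lt_or_ge m kg with hlt | hge
        · exact g5 m hlt hc0
        · omega
      subst hkgm
      rcases hf with ⟨e1, _⟩ | ⟨kf, e1, e2, e3, e4, e5⟩
      · rw [e1, g1]; split_ifs <;> constructor <;> omega
      · have hne : kf ≠ m := by
          intro h
          rw [h, hc0] at e4
          simp at e4
        rw [e1, g1]; split_ifs <;> constructor <;> omega
  · -- no separator at all: both finds are -1
    have hmeq : m = rest.length := le_antisymm hmle hmge
    have noSep : ∀ (c : Char), sepChar c = true → ∀ k : Nat, k < rest.length → rest[k]? ≠ some c := by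
      intro c hc k hk hget
      obtain ⟨c', hc1, hc2⟩ := takeWhile_pos_not_sep rest k (by omega)
      rw [hget] at hc1
      obtain rfl : c = c' := by injection hc1
      rw [hc2] at hc
      exact Bool.false_ne_true hc
    have hf' : PySem.Chars.find rest [','] = -1 := by
      rcases hf with ⟨h, _⟩ | ⟨kf, _, e2, _, e4, _⟩
      · exact h
      · exact absurd e4 (noSep ',' (by decide) kf e2)
    have hg' : PySem.Chars.find rest [')'] = -1 := by
      rcases hg with ⟨h, _⟩ | ⟨kg, _, g2, _, g4, _⟩
      · exact h
      · exact absurd g4 (noSep ')' (by decide) kg g2)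
    rw [hf', hg']; split_ifs <;> constructor <;> omega

-- one prefix step: when p occurs, both sides return p ++ the non-separator run after it
lemma goA_eq_goB (cs : List Char) (ps : List (List Char))
    (hps : ∀ p ∈ ps, p ≠ [] ∧ p.takeWhile (fun c => !sepChar c) = p) :
    goA cs ps = goB cs ps := by
  induction ps with
  | nil => rfl
  | cons p ps ih =>
    obtain ⟨hpne, hpall⟩ := hps p (List.mem_cons_self ..)
    simp only [goA, goB]
    by_cases h0 : 0 ≤ PySem.Chars.find cs p
    · rw [if_pos h0]
      have hfound : (partition3 cs p).2.1 = p := by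
        simp only [partition3, if_pos h0]
      have hafter : (partition3 cs p).2.2 = cs.drop ((PySem.Chars.find cs p).toNat + p.length) := by
        simp only [partition3, if_pos h0]
      rw [if_pos (by rw [hfound]; exact hpne), hfound, hafter]
      -- rest = cs[idx:]
      have hrest : PySem.Chars.slice cs (some (PySem.Chars.find cs p)) none
          = cs.drop (PySem.Chars.find cs p).toNat := by
        simp only [PySem.Chars.slice_eq_listSlice]
        exact PySem.List.slice_from cs h0
      obtain ⟨t, ht⟩ := (PySem.Chars.find_spec h0).1
      have htdrop : cs.drop ((PySem.Chars.find cs p).toNat + p.length) = t := by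
        have h2 := congrArg (List.drop p.length) ht
        rw [List.drop_left, List.drop_drop] at h2
        exact h2.symm
      obtain ⟨he0, hetn⟩ := end_eq_takeWhile (PySem.Chars.slice cs (some (PySem.Chars.find cs p)) none)
      rw [PySem.Chars.slice_eq_listSlice, PySem.List.slice_to _ he0, hetn, htdrop,
        takeUntilSepC_eq_takeWhile]
      rw [hrest, ← ht]
      have hwp : (p ++ t).takeWhile (fun c => !sepChar c) = p ++ t.takeWhile (fun c => !sepChar c) := by
        rw [List.takeWhile_append, hpall, if_pos rfl]
      rw [hwp]
      have hpref : p ++ t.takeWhile (fun c => !sepChar c) <+: p ++ t := by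
        obtain ⟨u, hu⟩ := List.takeWhile_prefix (l := t) (fun c => !sepChar c)
        exact ⟨u, by rw [List.append_assoc, hu]⟩
      exact (List.prefix_iff_eq_take.mp hpref).symm
    · rw [if_neg h0]
      have hfound : (partition3 cs p).2.1 = [] := by
        simp only [partition3, if_neg h0]
      rw [if_neg (by rw [hfound]; simp)]
      exact ih (fun q hq => hps q (List.mem_cons_of_mem _ hq))

-- ===== VERDICT (by name: the statement is the Claim_ definition above) =====
theorem extract_inner_urn_py_spec : Claim_equal_extract_inner_urn_py := by
  intro s _
  unfold Spec_extract_inner_urn_py extract_inner_urn_py extract_inner_urn_py_alt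
  refine congrArg String.ofList (goA_eq_goB _ _ ?_)
  intro p hp
  simp only [List.mem_cons] at hp
  rcases hp with h | h | h <;> first | (subst h; exact ⟨by decide, by decide⟩) | simp at h
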